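-- pv_equiv track=rewrite | github.com/PrathibaRamesh/Competitive-Coding-1 | Problem1.py | Find
-- ===== SOURCE A (Python) =====
-- def Find(nums):
--     low = 0
--     high = len(nums)-1
--     while low <= high:
--         mid = low + (high-low) //2
--         if nums[mid] - mid == 1:
--             low = mid + 1
--         else:
--             high = mid - 1
--     return low + 1
-- ===== SOURCE B (Python) =====
-- def Find(nums):
--     # Divide-and-conquer on list slices: keep the current segment and its
--     # starting offset; pick the segment's midpoint and recurse on the
--     # matching half-slice.  No low/high pointers.
--     def go(seg, off):
--         if not seg:
--             return off
--         mid = (len(seg) - 1) // 2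
--         if seg[mid] - (off + mid) == 1:
--             return go(seg[mid + 1:], off + mid + 1)
--         return go(seg[:mid], off)
--     return go(nums, 0) + 1
-- ===== Notes on version B (the rewrite author's own statement) =====
-- stated objective: alternative
-- what changed: Replaces the iterative two-pointer (low/high) binary search by recursion on list slices: a helper go(seg, off) takes the current segment and its starting offset, tests the segment's midpoint element, and recurses on the half-slice seg[mid+1:] or seg[:mid]; there are no index pointers and the +1 is applied once at the top.
import Mathlib
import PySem

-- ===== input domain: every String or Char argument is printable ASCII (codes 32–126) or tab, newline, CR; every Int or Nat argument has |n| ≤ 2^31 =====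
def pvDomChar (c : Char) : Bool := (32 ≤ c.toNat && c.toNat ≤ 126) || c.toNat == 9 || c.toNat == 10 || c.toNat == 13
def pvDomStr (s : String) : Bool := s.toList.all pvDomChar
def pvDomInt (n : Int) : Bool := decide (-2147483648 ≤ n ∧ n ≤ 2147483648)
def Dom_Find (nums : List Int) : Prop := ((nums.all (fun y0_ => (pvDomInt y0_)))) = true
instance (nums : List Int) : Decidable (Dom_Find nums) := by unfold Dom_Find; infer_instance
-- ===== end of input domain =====

-- B replaces A's iterative two-pointer binary search by recursion on list slices with an offset
-- (alternative decomposition, same branch decisions, same result).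

-- ===== PORT A =====
-- A's while-loop over mutable (low, high), carried as a fuel recursion; nums.length + 1
-- iterations always suffice (the search width strictly decreases), so the fuel guard never fires.
-- Indices are always in range, so pyGetD is exact.
def FindLoop (nums : List Int) (fuel : Nat) (low high : Int) : Int :=
  match fuel with
  | 0 => low + 1
  | fuel + 1 =>
    if low ≤ high then
      let mid := low + PySem.Int.floordiv (high - low) 2
      if PySem.List.pyGetD nums mid 0 - mid = 1 then
        FindLoop nums fuel (mid + 1) high
      else
        FindLoop nums fuel low (mid - 1)
    else
      low + 1

def Find (nums : List Int) : Int := FindLoop nums (nums.length + 1) 0 (nums.length - 1)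

-- ===== PORT B =====
-- go(seg, off) from Source B: structural recursion on the slice.  (len(seg)-1)//2 is Nat division
-- (len ≥ 1 in that branch, so exact); seg[mid] is in range, so getD is exact; the slices
-- seg[mid+1:] and seg[:mid] have nonnegative in-range bounds, so drop/take are exact.
def FindGo (seg : List Int) (off : Int) : Int :=
  if h : seg.isEmpty then off
  else
    let mid : Nat := (seg.length - 1) / 2
    if seg.getD mid 0 - (off + (mid : Int)) = 1 then
      FindGo (seg.drop (mid + 1)) (off + (mid : Int) + 1)
    else
      FindGo (seg.take mid) off
termination_by seg.length
decreasing_by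
  all_goals
    have hp : 0 < seg.length := by
      cases seg with
      | nil => simp at h
      | cons a tl => simp
  · rw [List.length_drop]; omega
  · rw [List.length_take]; omega

def Find_alt (nums : List Int) : Int := FindGo nums 0 + 1

-- ===== PRECONDITION & SPEC =====
def Spec_Find (nums : List Int) (out : Int) : Prop := out = Find_alt nums
instance (nums : List Int) (out : Int) : Decidable (Spec_Find nums out) := by unfold Spec_Find; infer_instance

-- ===== CLAIM (what is proved, stated in full; the proofs are below) =====
def Claim_equal_Find : Prop := ∀ (nums : List Int), Dom_Find nums → Spec_Find nums (Find nums)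

-- ===== LEMMAS AND PROOFS =====

-- A's midpoint equals off + (len-1)/2 (Nat division) when the segment at off has length len ≥ 1.
theorem midA_eq (off : Int) (len : Nat) (hlen : 1 ≤ len) :
    off + PySem.Int.floordiv ((off + (len : Int) - 1) - off) 2 = off + (((len - 1) / 2 : Nat) : Int) := by
  rw [PySem.Int.floordiv_eq_ediv_of_pos (by omega)]
  have h1 : ((off + (len : Int) - 1) - off) = ((len - 1 : Nat) : Int) := by omega
  rw [h1]
  omega

-- One unfolding of FindGo on a nonempty segment, with the let zeta-reduced.
theorem FindGo_cons (seg : List Int) (off : Int) (h : seg ≠ []) :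
    FindGo seg off =
      if seg.getD ((seg.length - 1) / 2) 0 - (off + (((seg.length - 1) / 2 : Nat) : Int)) = 1 then
        FindGo (seg.drop ((seg.length - 1) / 2 + 1)) (off + (((seg.length - 1) / 2 : Nat) : Int) + 1)
      else FindGo (seg.take ((seg.length - 1) / 2)) off := by
  rw [FindGo, dif_neg (by simpa [List.isEmpty_iff] using h)]

-- Main invariant: when seg is the slice nums[off : off+seg.length], the loop on
-- (off, off+seg.length-1) returns go(seg, off) + 1, given fuel > seg.length and the slice fits.
theorem loop_eq_go (nums : List Int) :
    ∀ (fuel : Nat) (off : Int) (seg : List Int),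
      seg.length < fuel → 0 ≤ off → off.toNat + seg.length ≤ nums.length →
      seg = (nums.drop off.toNat).take seg.length →
      FindLoop nums fuel off (off + (seg.length : Int) - 1) = FindGo seg off + 1 := by
  intro fuel
  induction fuel with
  | zero => intro off seg h _ _ _; omega
  | succ fuel ih =>
    intro off seg hfuel hoff hfit hseg
    by_cases hnil : seg = []
    · subst hnil
      rw [FindLoop, if_neg (by simp)]
      have hgo : FindGo ([] : List Int) off = off := by rw [FindGo]; simp
      rw [hgo]
    · have hlen1 : 1 ≤ seg.length := by
        cases seg with | nil => exact absurd rfl hnil | cons a tl => simp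
      simp only [FindLoop]
      rw [if_pos (show off ≤ off + (seg.length : Int) - 1 by omega)]
      rw [FindGo_cons seg off hnil]
      rw [midA_eq off seg.length hlen1]
      set L := seg.length with hL
      set mid : Nat := (L - 1) / 2 with hmid
      have hmidlt : mid < L := by omega
      have hsegmid : seg.getD mid 0 = nums.getD (off.toNat + mid) 0 := by
        conv_lhs => rw [hseg]
        rw [List.getD_eq_getElem?_getD, List.getD_eq_getElem?_getD,
          List.getElem?_take, List.getElem?_drop]
        simp [hmidlt]
      have hpy : PySem.List.pyGetD nums (off + (mid : Int)) 0 = nums.getD (off.toNat + mid) 0 := by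
        have h2 : off + (mid : Int) = ((off.toNat + mid : Nat) : Int) := by omega
        rw [h2, PySem.List.pyGetD_natCast]
      by_cases hb : nums.getD (off.toNat + mid) 0 - (off + (mid : Int)) = 1
      · rw [if_pos (by rw [hpy]; exact hb), if_pos (by rw [hsegmid]; exact hb)]
        have hlen' : (seg.drop (mid + 1)).length = L - (mid + 1) := by
          rw [List.length_drop]
        have hrec := ih (off + (mid : Int) + 1) (seg.drop (mid + 1))
          (by rw [hlen']; omega) (by omega) (by rw [hlen']; omega)
          (by
            conv_lhs => rw [hseg]
            rw [List.drop_take, List.drop_drop, hlen']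
            have h3 : (off + (mid : Int) + 1).toNat = off.toNat + (mid + 1) := by omega
            rw [h3])
        rw [hlen'] at hrec
        have harg : off + (mid : Int) + 1 + ((L - (mid + 1) : Nat) : Int) - 1
            = off + (L : Int) - 1 := by omega
        rw [harg] at hrec
        exact hrec
      · rw [if_neg (by rw [hpy]; exact hb), if_neg (by rw [hsegmid]; exact hb)]
        have hlen' : (seg.take mid).length = mid := by
          rw [List.length_take]; omega
        have hrec := ih off (seg.take mid)
          (by rw [hlen']; omega) hoff (by rw [hlen']; omega)
          (by
            conv_lhs => rw [hseg]
            rw [List.take_take, hlen']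
            congr 1
            omega)
        rw [hlen'] at hrec
        exact hrec

-- ===== VERDICT (by name: the statement is the Claim_ definition above) =====
theorem Find_spec : Claim_equal_Find := by
  intro nums _
  unfold Spec_Find Find Find_alt
  have h := loop_eq_go nums (nums.length + 1) 0 nums
    (by omega) le_rfl (by simp) (by simp)
  simpa using h
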